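-- pv_equiv track=rewrite | github.com/codecov/worker | services/ta_utils.py | properly_backtick
-- ===== SOURCE A (Python) =====
-- def properly_backtick(content: str) -> str:
--     max_backtick_count = 0
--     curr_backtick_count = 0
--     prev_char = None
--     for char in content:
--         if char == "`":
--             curr_backtick_count += 1
--         else:
--             curr_backtick_count = 0
--
--         if curr_backtick_count > max_backtick_count:
--             max_backtick_count = curr_backtick_count
--
--     backticks = "`" * (max_backtick_count + 1)
--     return f"{backticks}python\n{content}\n{backticks}"
-- ===== SOURCE B (Python) =====
-- def properly_backtick(content: str) -> str:
--     backticks = "`"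
--     while backticks in content:
--         backticks += "`"
--     return f"{backticks}python\n{content}\n{backticks}"
-- ===== Notes on version B (the rewrite author's own statement) =====
-- stated objective: simpler
-- what changed: B never computes the maximal backtick run: it grows a candidate fence one backtick at a time until that fence no longer occurs as a substring of the content, replacing A's char-by-char run-counting scan with repeated substring-membership tests (the 'in' scan runs in C, not the bytecode loop).
import Mathlib
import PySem

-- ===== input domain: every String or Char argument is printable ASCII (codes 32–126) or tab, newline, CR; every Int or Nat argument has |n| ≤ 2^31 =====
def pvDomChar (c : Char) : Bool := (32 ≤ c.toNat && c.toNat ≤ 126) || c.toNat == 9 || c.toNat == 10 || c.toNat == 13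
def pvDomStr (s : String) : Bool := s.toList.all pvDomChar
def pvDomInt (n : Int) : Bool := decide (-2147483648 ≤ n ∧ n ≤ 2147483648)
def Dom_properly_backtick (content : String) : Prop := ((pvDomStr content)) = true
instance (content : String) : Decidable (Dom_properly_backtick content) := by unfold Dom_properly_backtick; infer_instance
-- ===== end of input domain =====

-- B never computes the maximal backtick run: it grows a candidate fence by one backtick
-- while the fence still occurs as a substring of the content (simpler; not faster).

-- ===== PORT A =====
-- A's for-loop over the characters, carrying (max_backtick_count, curr_backtick_count).
-- Counters are Nat: in Python too they start at 0 and only grow or reset to 0.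
def pbFoldA : List Char → Nat × Nat → Nat × Nat
  | [], s => s
  | ch :: rest, s =>
    let curr := if ch = '`' then s.2 + 1 else 0
    let mx := if curr > s.1 then curr else s.1
    pbFoldA rest (mx, curr)

-- "`" * (m + 1) and the f-string, hand-ported exactly (ASCII concatenation).
def properly_backtick (content : String) : String :=
  let s := pbFoldA content.toList (0, 0)
  let backticks := String.mk (List.replicate (s.1 + 1) '`')
  backticks ++ "python\n" ++ content ++ "\n" ++ backticks

-- ===== PORT B =====
-- B's while-loop: 'backticks in content' is PySem.Chars.isIn (Python substring test);
-- 'backticks += "`"' appends one backtick. Terminates because a substring is no longer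
-- than the content.
def pbGrow (l : List Char) (fence : List Char) : List Char :=
  if h : PySem.Chars.isIn fence l = true then pbGrow l (fence ++ ['`']) else fence
termination_by l.length + 1 - fence.length
decreasing_by
  have : fence.length ≤ l.length := by
    simpa using ((PySem.Chars.isIn_iff_infix fence l).mp h).length_le
  simp
  omega

def properly_backtick_alt (content : String) : String :=
  let backticks := String.mk (pbGrow content.toList ['`'])
  backticks ++ "python\n" ++ content ++ "\n" ++ backticks

-- ===== PRECONDITION & SPEC =====
def Spec_properly_backtick (content : String) (out : String) : Prop := out = properly_backtick_alt content
instance (content : String) (out : String) : Decidable (Spec_properly_backtick content out) := by unfold Spec_properly_backtick; infer_instance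

-- ===== CLAIM (what is proved, stated in full; the proofs are below) =====
def Claim_equal_properly_backtick : Prop := ∀ (content : String), Dom_properly_backtick content → Spec_properly_backtick content (properly_backtick content)

-- ===== LEMMAS AND PROOFS =====

-- (max backtick run, leading backtick run) of a list, computed from the right
def pbMrr : List Char → Nat × Nat
  | [] => (0, 0)
  | ch :: rest =>
    let s := pbMrr rest
    if ch = '`' then (max s.1 (s.2 + 1), s.2 + 1) else (s.1, 0)

theorem pbMrr_snd_le_fst : ∀ l : List Char, (pbMrr l).2 ≤ (pbMrr l).1
  | [] => le_refl _
  | ch :: rest => by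
    have := pbMrr_snd_le_fst rest
    by_cases h : ch = '`' <;> simp [pbMrr, h]

-- replicate n '`' is a prefix of l iff n ≤ the leading backtick run
theorem prefix_iff_mrr : ∀ (l : List Char) (n : Nat),
    List.replicate n '`' <+: l ↔ n ≤ (pbMrr l).2
  | [], n => by
    cases n <;> simp [pbMrr, List.replicate]
  | ch :: rest, n => by
    by_cases h : ch = '`'
    · subst h
      cases n with
      | zero => simp [pbMrr]
      | succ m =>
        rw [List.replicate_succ]
        simp only [pbMrr, if_true, List.cons_prefix_cons, true_and]
        rw [prefix_iff_mrr rest m]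
        omega
    · cases n with
      | zero => simp [pbMrr, h]
      | succ m =>
        rw [List.replicate_succ]
        simp [pbMrr, h, List.cons_prefix_cons, Ne.symm h]

-- replicate n '`' is a substring iff n ≤ the maximal backtick run
theorem infix_iff_mrr : ∀ (l : List Char) (n : Nat),
    List.replicate n '`' <:+: l ↔ n ≤ (pbMrr l).1
  | [], n => by cases n <;> simp [pbMrr, List.replicate]
  | ch :: rest, n => by
    rw [List.infix_cons_iff, prefix_iff_mrr, infix_iff_mrr rest n]
    by_cases h : ch = '`' <;> simp [pbMrr, h] <;> omega

-- A's fold computes the maximal backtick run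
theorem foldA_eq_mrr : ∀ (l : List Char) (m c : Nat), c ≤ m →
    (pbFoldA l (m, c)).1 = max m (max (pbMrr l).1 ((pbMrr l).2 + c))
  | [], m, c, h => by simp [pbFoldA, pbMrr]; omega
  | ch :: rest, m, c, h => by
    by_cases hb : ch = '`'
    · subst hb
      have ih := foldA_eq_mrr rest (if c + 1 > m then c + 1 else m) (c + 1) (by split <;> omega)
      simp only [pbFoldA, pbMrr, if_true]
      rw [ih]; split <;> omega
    · have ih := foldA_eq_mrr rest m 0 (Nat.zero_le m)
      have hs := pbMrr_snd_le_fst rest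
      simp only [pbFoldA, pbMrr, if_neg hb]
      simp only [show (0 > m) = False by simp, if_false, Nat.add_zero] at ih ⊢
      rw [ih]; omega

-- B's loop returns the fence of length (max run) + 1
theorem grow_eq : ∀ (j : Nat) (l : List Char) (n : Nat), j = (pbMrr l).1 + 1 - n →
    1 ≤ n → n ≤ (pbMrr l).1 + 1 →
    pbGrow l (List.replicate n '`') = List.replicate ((pbMrr l).1 + 1) '`'
  | 0, l, n, hj, h1, h2 => by
    have hn : n = (pbMrr l).1 + 1 := by omega
    rw [pbGrow]
    have : ¬ (List.replicate n '`' <:+: l) := by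
      rw [infix_iff_mrr]; omega
    rw [dif_neg (by simpa [PySem.Chars.isIn_iff_infix] using this), hn]
  | j + 1, l, n, hj, h1, h2 => by
    have hn : n ≤ (pbMrr l).1 := by omega
    rw [pbGrow]
    have : List.replicate n '`' <:+: l := by rw [infix_iff_mrr]; omega
    rw [dif_pos (by simpa [PySem.Chars.isIn_iff_infix] using this)]
    rw [show List.replicate n '`' ++ ['`'] = List.replicate (n + 1) '`' by
      simp [List.replicate_succ']]
    exact grow_eq j l (n + 1) (by omega) (by omega) (by omega)

theorem fence_eq (l : List Char) :
    pbGrow l ['`'] = List.replicate ((pbFoldA l (0, 0)).1 + 1) '`' := by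
  have hA := foldA_eq_mrr l 0 0 (le_refl 0)
  have hs := pbMrr_snd_le_fst l
  have hB := grow_eq (pbMrr l).1 l 1 (by omega) (le_refl 1) (by omega)
  simp only [List.replicate_one] at hB
  rw [hB, hA]
  congr 2
  omega

-- ===== VERDICT (by name: the statement is the Claim_ definition above) =====
theorem properly_backtick_spec : Claim_equal_properly_backtick := by
  intro content _
  show _ = _
  simp only [properly_backtick, properly_backtick_alt, fence_eq]
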